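-- pv_equiv track=rewrite | github.com/0xKev/wordle-solver | wordle-solver.py | get_index_correct_letters
-- ===== SOURCE A (Python) =====
-- def get_index_correct_letters(correct_letters) -> list:
--     """
--     Get the index and letter of correct letters.
--
--     Parameters:
--     - correct_letters: A dictionary of correct letters.
--
--     Returns:
--     - sequences: A list of sequences of correct letters.
--     """
--     sequences = []
--     current_sequence = []
--
--     for index in range(len(correct_letters)):
--         if correct_letters[index]:
--             current_sequence.append((index, correct_letters[index][0]))
--         elif current_sequence:
--             sequences.append(current_sequence)
--             current_sequence = []
--
--     if current_sequence:
--         sequences.append(current_sequence)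
--
--     return sequences
-- ===== SOURCE B (Python) =====
-- def get_index_correct_letters(correct_letters) -> list:
--     """Two-phase version: collect (index, letter) pairs of filled slots first,
--     then glue pairs with consecutive indices into runs."""
--     filled = [(i, correct_letters[i][0]) for i in range(len(correct_letters))
--               if correct_letters[i]]
--     sequences = []
--     for pair in filled:
--         if sequences and sequences[-1][-1][0] == pair[0] - 1:
--             sequences[-1].append(pair)
--         else:
--             sequences.append([pair])
--     return sequences
-- ===== Notes on version B (the rewrite author's own statement) =====
-- stated objective: alternative
-- what changed: A does one pass with a current-run accumulator that it flushes at each gap; B first builds the flat list of (index, letter) pairs for filled slots and then groups pairs into runs by index-adjacency with the previous pair.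
import Mathlib
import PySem

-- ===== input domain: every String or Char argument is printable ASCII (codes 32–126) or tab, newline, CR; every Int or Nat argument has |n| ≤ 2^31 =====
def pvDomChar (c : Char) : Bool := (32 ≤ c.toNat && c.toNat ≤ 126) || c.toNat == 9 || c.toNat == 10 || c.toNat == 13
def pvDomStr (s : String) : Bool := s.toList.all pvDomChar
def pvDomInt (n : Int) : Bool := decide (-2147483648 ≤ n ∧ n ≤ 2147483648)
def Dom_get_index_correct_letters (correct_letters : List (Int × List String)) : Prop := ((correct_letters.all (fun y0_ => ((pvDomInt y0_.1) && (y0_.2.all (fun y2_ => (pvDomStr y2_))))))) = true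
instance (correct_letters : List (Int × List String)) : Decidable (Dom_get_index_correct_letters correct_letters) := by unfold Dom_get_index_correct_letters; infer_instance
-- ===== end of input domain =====

-- B replaces A's flush-on-gap accumulator pass by a map/filter pass followed by index-adjacency grouping (alternative decomposition, same cost).


-- ===== PORT A =====
-- body of A's for-loop: a truthy value appends (index, value[0]) to the current run, a falsy one flushes a nonempty run.
-- d.getD i [] is Python's correct_letters[index]: on inputs admitted by Pre_ every index in range is a key, so the
-- default [] is never taken there (outside Pre_ Python raises KeyError and nothing is claimed).
def pvAstep (d : PySem.Dict Int (List String)) (st : List (List (Int × String)) × List (Int × String)) (i : Int) :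
    List (List (Int × String)) × List (Int × String) :=
  match d.getD i [] with
  | c :: _ => (st.1, st.2 ++ [(i, c)])
  | [] => if st.2 ≠ [] then (st.1 ++ [st.2], []) else st

def get_index_correct_letters (correct_letters : List (Int × List String)) : List (List (Int × String)) :=
  let d := PySem.Dict.ofList correct_letters
  let st := (PySem.List.pyRange 0 (d.size : Int) 1).foldl (pvAstep d) ([], [])
  if st.2 ≠ [] then st.1 ++ [st.2] else st.1

-- ===== PORT B =====
-- Source B's comprehension element: some (i, value[0]) for a filled slot, none for an empty one (same getD-remark as in A)
def pvBpair (d : PySem.Dict Int (List String)) (i : Int) : Option (Int × String) :=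
  match d.getD i [] with
  | c :: _ => some (i, c)
  | [] => none

-- Source B's loop body: append the pair to the last run if its index is adjacent, else start a new run
def pvBglue (seqs : List (List (Int × String))) (p : Int × String) : List (List (Int × String)) :=
  match seqs.getLast? with
  | some last =>
      if last.getLast?.map Prod.fst = some (p.1 - 1) then seqs.dropLast ++ [last ++ [p]]
      else seqs ++ [[p]]
  | none => seqs ++ [[p]]

def get_index_correct_letters_alt (correct_letters : List (Int × List String)) : List (List (Int × String)) :=
  let d := PySem.Dict.ofList correct_letters
  let filled := (PySem.List.pyRange 0 (d.size : Int) 1).filterMap (pvBpair d)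
  filled.foldl pvBglue []

-- ===== PRECONDITION & SPEC =====
-- A raises KeyError unless every index in range(len(dict)) is a key of the dict; Pre_ admits exactly the inputs
-- whose dict (duplicates collapsed by insertion, as Python's dict construction does) has keys covering 0..len-1.
def Pre_get_index_correct_letters (correct_letters : List (Int × List String)) : Prop :=
  ((List.range (PySem.Dict.ofList correct_letters).size).all
    (fun i => (PySem.Dict.ofList correct_letters).contains (i : Int))) = true

instance (correct_letters : List (Int × List String)) : Decidable (Pre_get_index_correct_letters correct_letters) := by
  unfold Pre_get_index_correct_letters; infer_instance

def pvWitness_get_index_correct_letters : (List (Int × List String)) := [(0, ["a"]), (1, []), (2, ["b", "c"])]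

def Spec_get_index_correct_letters (correct_letters : List (Int × List String)) (out : List (List (Int × String))) : Prop := out = get_index_correct_letters_alt correct_letters
instance (correct_letters : List (Int × List String)) (out : List (List (Int × String))) : Decidable (Spec_get_index_correct_letters correct_letters out) := by unfold Spec_get_index_correct_letters; infer_instance

-- ===== CLAIM (what is proved, stated in full; the proofs are below) =====
def Claim_equal_get_index_correct_letters : Prop := ∀ (correct_letters : List (Int × List String)), Dom_get_index_correct_letters correct_letters → Pre_get_index_correct_letters correct_letters → Spec_get_index_correct_letters correct_letters (get_index_correct_letters correct_letters)

-- ===== LEMMAS AND PROOFS =====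

-- last index stored in a list of runs (the index B's adjacency test looks at)
def pvLastIdx (seqs : List (List (Int × String))) : Option Int :=
  (seqs.getLast?.bind List.getLast?).map Prod.fst

-- how A's state reads as a finished list of runs
def pvFinish (st : List (List (Int × String)) × List (Int × String)) : List (List (Int × String)) :=
  if st.2 ≠ [] then st.1 ++ [st.2] else st.1

theorem pvMain (d : PySem.Dict Int (List String)) (n : Nat) :
    (((PySem.List.pyRange 0 (n : Int) 1).filterMap (pvBpair d)).foldl pvBglue []
        = pvFinish ((PySem.List.pyRange 0 (n : Int) 1).foldl (pvAstep d) ([], [])))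
    ∧ (((PySem.List.pyRange 0 (n : Int) 1).foldl (pvAstep d) ([], [])).2 = [] →
        ∀ j, pvLastIdx ((PySem.List.pyRange 0 (n : Int) 1).foldl (pvAstep d) ([], [])).1 = some j → j + 1 < (n : Int))
    ∧ (((PySem.List.pyRange 0 (n : Int) 1).foldl (pvAstep d) ([], [])).2 ≠ [] →
        ((PySem.List.pyRange 0 (n : Int) 1).foldl (pvAstep d) ([], [])).2.getLast?.map Prod.fst = some ((n : Int) - 1)) := by
  induction n with
  | zero =>
      have h0 : PySem.List.pyRange 0 ((0 : Nat) : Int) 1 = [] := by decide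
      rw [h0]
      refine ⟨rfl, ?_, ?_⟩
      · intro _ j hj; simp [pvLastIdx] at hj
      · intro h; exact absurd rfl h
  | succ n ih =>
      obtain ⟨ihB, hEmp, hNe⟩ := ih
      set st := (PySem.List.pyRange 0 (n : Int) 1).foldl (pvAstep d) ([], []) with hstdef
      have hrange : PySem.List.pyRange 0 ((n + 1 : Nat) : Int) 1
          = PySem.List.pyRange 0 (n : Int) 1 ++ [(n : Int)] := by
        have h := PySem.List.pyRange_one_succ_right (a := 0) (b := (n : Int)) (by positivity)
        push_cast
        exact h
      rw [hrange, List.filterMap_append, List.foldl_append, List.foldl_append, ihB, ← hstdef]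
      simp only [List.foldl_cons, List.foldl_nil]
      rcases hv : d.getD (n : Int) [] with _ | ⟨c, cs⟩
      · -- empty slot: B adds nothing, A flushes a nonempty current run
        have hpair : ([(n : Int)]).filterMap (pvBpair d) = [] := by
          simp [pvBpair, hv]
        rw [hpair]
        simp only [List.foldl_nil]
        by_cases h2 : st.2 = []
        · have hstep : pvAstep d st (n : Int) = st := by
            simp [pvAstep, hv, h2]
          rw [hstep]
          refine ⟨rfl, ?_, ?_⟩
          · intro _ j hj
            have := hEmp h2 j hj
            push_cast; omega
          · intro h; exact absurd h2 h
        · have hstep : pvAstep d st (n : Int) = (st.1 ++ [st.2], []) := by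
            simp [pvAstep, hv, h2]
          rw [hstep]
          refine ⟨?_, ?_, ?_⟩
          · simp [pvFinish, h2]
          · intro _ j hj
            have hlast := hNe h2
            simp only [pvLastIdx, List.getLast?_concat, Option.bind_some] at hj
            rw [hlast] at hj
            have hjv : (n : Int) - 1 = j := Option.some.inj hj
            push_cast; omega
          · intro h; exact absurd rfl h
      · -- filled slot: B glues the pair (n, c), A extends the current run
        have hpair : ([(n : Int)]).filterMap (pvBpair d) = [((n : Int), c)] := by
          simp [pvBpair, hv]
        rw [hpair]
        simp only [List.foldl_cons, List.foldl_nil]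
        have hstep : pvAstep d st (n : Int) = (st.1, st.2 ++ [((n : Int), c)]) := by
          simp [pvAstep, hv]
        rw [hstep]
        refine ⟨?_, ?_, ?_⟩
        · by_cases h2 : st.2 = []
          · -- previous run just ended at a gap (or nothing yet): B starts a new run
            have hfin : pvFinish st = st.1 := by simp [pvFinish, h2]
            rw [hfin]
            have hglue : pvBglue st.1 ((n : Int), c) = st.1 ++ [[((n : Int), c)]] := by
              rcases hlast : st.1.getLast? with _ | last
              · simp [pvBglue, hlast]
              · rcases hll : last.getLast? with _ | q
                · simp [pvBglue, hlast, hll]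
                · have hne : q.1 ≠ (n : Int) - 1 := by
                    intro hc
                    have hj : pvLastIdx st.1 = some q.1 := by
                      simp [pvLastIdx, hlast, hll]
                    have := hEmp h2 q.1 hj
                    omega
                  simp [pvBglue, hlast, hll, hne]
            rw [hglue]
            simp [pvFinish, h2]
          · -- the previous index was filled too: B merges into the last run
            have hfin : pvFinish st = st.1 ++ [st.2] := by simp [pvFinish, h2]
            rw [hfin]
            have hlast := hNe h2
            have hglue : pvBglue (st.1 ++ [st.2]) ((n : Int), c)
                = st.1 ++ [st.2 ++ [((n : Int), c)]] := by
              simp [pvBglue, hlast]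
            rw [hglue]
            have hne2 : st.2 ++ [((n : Int), c)] ≠ [] := by simp
            simp [pvFinish, hne2]
        · intro habs; simp at habs
        · intro _
          push_cast
          simp

-- ===== VERDICT (by name: the statement is the Claim_ definition above) =====
theorem get_index_correct_letters_spec : Claim_equal_get_index_correct_letters := by
  intro cl _ _
  show get_index_correct_letters cl = get_index_correct_letters_alt cl
  simp only [get_index_correct_letters, get_index_correct_letters_alt]
  exact ((pvMain (PySem.Dict.ofList cl) (PySem.Dict.ofList cl).size).1).symm
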